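-- pv_equiv track=rewrite | github.com/jkhazri/scripts | generate_inventory_Kube.py | insert_into_group
-- ===== SOURCE A (Python) =====
-- def insert_into_group(existing_lines, group, new_entries):
--     group_header = f"[{group}]"
--     updated_lines = []
--     inserted = False
--     i = 0
--
--     while i < len(existing_lines):
--         line = existing_lines[i]
--         updated_lines.append(line)
--         if line.strip() == group_header:
--             i += 1
--             # Add new entries right after the group header or existing content
--             while i < len(existing_lines) and not existing_lines[i].startswith('['):
--                 updated_lines.append(existing_lines[i])
--                 i += 1
--             updated_lines.extend(new_entries)
--             inserted = True
--             continue
--         i += 1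
--
--     if not inserted:
--         updated_lines.append("")
--         updated_lines.append(group_header)
--         updated_lines.extend(new_entries)
--
--     return updated_lines
-- ===== SOURCE B (Python) =====
-- def insert_into_group(existing_lines, group, new_entries):
--     group_header = f"[{group}]"
--     updated_lines = []
--     in_group = False
--     inserted = False
--     for line in existing_lines:
--         if in_group and line.startswith('['):
--             updated_lines.extend(new_entries)
--             in_group = False
--         updated_lines.append(line)
--         if line.strip() == group_header:
--             in_group = True
--             inserted = True
--     if in_group:
--         updated_lines.extend(new_entries)
--     if not inserted:
--         updated_lines.append("")
--         updated_lines.append(group_header)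
--         updated_lines.extend(new_entries)
--     return updated_lines
-- ===== Notes on version B (the rewrite author's own statement) =====
-- stated objective: simpler
-- what changed: Replaced the index-driven outer while with a nested inner while that consumes the group body by a single flat for-loop over the lines carrying an in_group boolean, flushing new_entries lazily at the next '['-line or at end of input.
import Mathlib
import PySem

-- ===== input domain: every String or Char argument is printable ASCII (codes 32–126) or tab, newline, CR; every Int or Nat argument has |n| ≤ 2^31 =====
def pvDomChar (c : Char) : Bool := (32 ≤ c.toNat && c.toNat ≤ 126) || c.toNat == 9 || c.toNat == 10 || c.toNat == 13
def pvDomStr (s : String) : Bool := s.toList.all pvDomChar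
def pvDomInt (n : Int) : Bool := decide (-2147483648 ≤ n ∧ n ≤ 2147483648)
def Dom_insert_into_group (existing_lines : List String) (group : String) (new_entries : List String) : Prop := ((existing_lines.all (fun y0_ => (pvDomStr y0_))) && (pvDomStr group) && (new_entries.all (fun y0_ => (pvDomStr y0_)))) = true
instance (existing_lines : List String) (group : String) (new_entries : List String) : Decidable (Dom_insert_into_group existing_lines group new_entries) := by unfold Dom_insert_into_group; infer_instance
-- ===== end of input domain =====

-- B replaces A's nested while loops (inner loop consuming the group body) by one
-- flat pass carrying an in_group boolean that flushes new_entries lazily; objective: simpler.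

-- ===== PORT A =====
-- A's inner while loop: consume lines until one starts with '['; returns (consumed, rest).
def pvInnerA : List String → List String × List String
  | [] => ([], [])
  | l :: ls =>
    if PySem.Str.startswith l "[" then ([], l :: ls)
    else
      let p := pvInnerA ls
      (l :: p.1, p.2)

theorem pvInnerA_len : ∀ ls : List String, (pvInnerA ls).2.length ≤ ls.length
  | [] => Nat.le_refl _
  | l :: ls => by
    simp only [pvInnerA]
    split
    · simp
    · exact Nat.le_succ_of_le (pvInnerA_len ls)

-- A's outer while loop over the remaining suffix; returns (updated_lines, inserted).
def pvALoop (header : String) (entries : List String) : List String → List String × Bool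
  | [] => ([], false)
  | l :: ls =>
    if PySem.Str.strip l == header then
      let p := pvInnerA ls
      let t := pvALoop header entries p.2
      (l :: (p.1 ++ entries ++ t.1), true)
    else
      let t := pvALoop header entries ls
      (l :: t.1, t.2)
  termination_by ls => ls.length
  decreasing_by
    · simpa using Nat.lt_succ_of_le (pvInnerA_len ls)
    · simp

def insert_into_group (existing_lines : List String) (group : String) (new_entries : List String) : List String :=
  let group_header := "[" ++ group ++ "]"
  let r := pvALoop group_header new_entries existing_lines
  if r.2 then r.1 else r.1 ++ [""] ++ [group_header] ++ new_entries

-- ===== PORT B =====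
-- one step of B's for-loop; state = (updated_lines, in_group, inserted)
def pvBStep (header : String) (entries : List String) (st : List String × Bool × Bool) (l : String) : List String × Bool × Bool :=
  let st1 := if st.2.1 && PySem.Str.startswith l "[" then (st.1 ++ entries, false, st.2.2) else st
  let st2 := (st1.1 ++ [l], st1.2.1, st1.2.2)
  if PySem.Str.strip l == header then (st2.1, true, true) else st2

def insert_into_group_alt (existing_lines : List String) (group : String) (new_entries : List String) : List String :=
  let group_header := "[" ++ group ++ "]"
  let r := existing_lines.foldl (pvBStep group_header new_entries) ([], false, false)
  let r1 := if r.2.1 then r.1 ++ new_entries else r.1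
  if r.2.2 then r1 else r1 ++ [""] ++ [group_header] ++ new_entries

-- ===== PRECONDITION & SPEC =====
def Spec_insert_into_group (existing_lines : List String) (group : String) (new_entries : List String) (out : List String) : Prop := out = insert_into_group_alt existing_lines group new_entries
instance (existing_lines : List String) (group : String) (new_entries : List String) (out : List String) : Decidable (Spec_insert_into_group existing_lines group new_entries out) := by unfold Spec_insert_into_group; infer_instance

-- ===== CLAIM (what is proved, stated in full; the proofs are below) =====
def Claim_equal_insert_into_group : Prop := ∀ (existing_lines : List String) (group : String) (new_entries : List String), Dom_insert_into_group existing_lines group new_entries → Spec_insert_into_group existing_lines group new_entries (insert_into_group existing_lines group new_entries)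

-- ===== LEMMAS AND PROOFS =====

-- recursive description of B's fold, starting from a given in_group flag;
-- returns (lines emitted before the final flush, final in_group, whether any header matched)
def pvBRec (header : String) (entries : List String) : Bool → List String → List String × Bool × Bool
  | g, [] => ([], g, false)
  | g, l :: ls =>
    let flush := g && PySem.Str.startswith l "["
    let g1 := if flush then false else g
    let hdr := PySem.Str.strip l == header
    let g2 := if hdr then true else g1
    let t := pvBRec header entries g2 ls
    ((if flush then entries else []) ++ l :: t.1, t.2.1, hdr || t.2.2)

theorem foldl_pvBStep (header : String) (entries : List String) :
    ∀ (ls : List String) (acc : List String) (g ins : Bool),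
      ls.foldl (pvBStep header entries) (acc, g, ins) =
        (acc ++ (pvBRec header entries g ls).1,
         (pvBRec header entries g ls).2.1,
         ins || (pvBRec header entries g ls).2.2) := by
  intro ls
  induction ls with
  | nil => intro acc g ins; simp [pvBRec]
  | cons l ls ih =>
    intro acc g ins
    rw [List.foldl_cons]
    simp only [pvBRec]
    cases g <;> cases ins <;>
      by_cases hf : PySem.Chars.startswith l.toList ['['] = true <;>
        by_cases hh : (PySem.Str.strip l == header) = true <;>
          simp [pvBStep, hf, hh, ih]

-- B's loop started with in_group = true behaves like A's inner while followed by
-- a flush of entries at the next '['-line (or leaves in_group set at end of input)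
theorem pvBRec_true (header : String) (entries : List String) :
    ∀ ls : List String,
      (pvBRec header entries true ls).1 =
        (pvInnerA ls).1 ++
          (if (pvInnerA ls).2.isEmpty then []
           else entries ++ (pvBRec header entries false (pvInnerA ls).2).1) ∧
      (pvBRec header entries true ls).2.1 =
        (if (pvInnerA ls).2.isEmpty then true
         else (pvBRec header entries false (pvInnerA ls).2).2.1) := by
  intro ls
  induction ls with
  | nil => simp [pvBRec, pvInnerA]
  | cons l ls ih =>
    by_cases hs : PySem.Chars.startswith l.toList ['['] = true
    · refine ⟨?_, ?_⟩ <;> simp [pvBRec, pvInnerA, hs]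
    · refine ⟨?_, ?_⟩ <;> simp [pvBRec, pvInnerA, hs, ih.1, ih.2]

-- main correspondence between A's outer loop and B's flat loop
theorem pvALoop_eq_pvBRec (header : String) (entries : List String) :
    ∀ ls : List String,
      (pvALoop header entries ls).1 =
        (pvBRec header entries false ls).1 ++
          (if (pvBRec header entries false ls).2.1 then entries else []) ∧
      (pvALoop header entries ls).2 = (pvBRec header entries false ls).2.2 := by
  have main : ∀ (n : Nat) (ls : List String), ls.length ≤ n →
      (pvALoop header entries ls).1 =
        (pvBRec header entries false ls).1 ++
          (if (pvBRec header entries false ls).2.1 then entries else []) ∧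
      (pvALoop header entries ls).2 = (pvBRec header entries false ls).2.2 := by
    intro n
    induction n with
    | zero =>
      intro ls hl
      have : ls = [] := List.length_eq_zero_iff.mp (Nat.le_zero.mp hl)
      subst this
      simp [pvALoop, pvBRec]
    | succ n ihn =>
      intro ls hl
      cases ls with
      | nil => simp [pvALoop, pvBRec]
      | cons l ls =>
        have hls : ls.length ≤ n := by simpa using hl
        by_cases hh : (PySem.Str.strip l == header) = true
        · -- header matched: A runs the inner while over ls, B flips in_group on
          have hr : (pvInnerA ls).2.length ≤ n :=
            Nat.le_trans (pvInnerA_len ls) hls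
          have ihr := ihn (pvInnerA ls).2 hr
          have hbt := pvBRec_true header entries ls
          by_cases hre : (pvInnerA ls).2.isEmpty = true
          · have hnil : (pvInnerA ls).2 = [] := by simpa using hre
            refine ⟨?_, ?_⟩ <;>
              simp [pvALoop, pvBRec, hh, hbt.1, hbt.2, hnil]
          · refine ⟨?_, ?_⟩ <;>
              simp [pvALoop, pvBRec, hh, hbt.1, hbt.2, hre, ihr.1]
        · refine ⟨?_, ?_⟩ <;>
            simp [pvALoop, pvBRec, hh, (ihn ls hls).1, (ihn ls hls).2]
  intro ls
  exact main ls.length ls (Nat.le_refl _)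

-- in B, in_group can only be set by a header match, which also sets inserted
theorem pvBRec_ins (header : String) (entries : List String) :
    ∀ ls : List String, (pvBRec header entries false ls).2.2 = false →
      (pvBRec header entries false ls).2.1 = false := by
  intro ls
  induction ls with
  | nil => simp [pvBRec]
  | cons l ls ih =>
    intro h
    have hh : (PySem.Str.strip l == header) = false := by
      by_contra hc
      simp only [pvBRec, Bool.false_and] at h
      rcases Bool.or_eq_false_iff.mp h with ⟨h1, _⟩
      exact hc (by simp [h1])
    simp only [pvBRec, Bool.false_and, hh] at h ⊢
    exact ih h

-- ===== VERDICT (by name: the statement is the Claim_ definition above) =====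
theorem insert_into_group_spec : Claim_equal_insert_into_group := by
  intro els group entries _
  unfold Spec_insert_into_group insert_into_group insert_into_group_alt
  simp only [foldl_pvBStep]
  obtain ⟨h1, h2⟩ := pvALoop_eq_pvBRec ("[" ++ group ++ "]") entries els
  by_cases hins : (pvBRec ("[" ++ group ++ "]") entries false els).2.2 = true
  · by_cases hg1 : (pvBRec ("[" ++ group ++ "]") entries false els).2.1 = true <;>
      simp [h1, h2, hins, hg1]
  · have hins' : (pvBRec ("[" ++ group ++ "]") entries false els).2.2 = false := by
      simpa using hins
    have hg := pvBRec_ins ("[" ++ group ++ "]") entries els hins'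
    simp [h1, h2, hins', hg]
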